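-- pv_equiv track=rewrite | github.com/Shiva-Kumar-S-M/LeetCode | Binary Search/Zero_filled.py | countZeroFilledSubarrays
-- ===== SOURCE A (Python) =====
-- def countZeroFilledSubarrays(nums):
--     count=0
--     res=0
--     for num in nums:
--         if num==0:
--             count+=1
--             res+=count
--         else:
--             count=0
--     return res
-- ===== SOURCE B (Python) =====
-- def countZeroFilledSubarrays(nums):
--     bounds = [-1] + [i for i, x in enumerate(nums) if x != 0] + [len(nums)]
--     return sum((b - a - 1) * (b - a) // 2 for a, b in zip(bounds, bounds[1:]))
-- ===== Notes on version B (the rewrite author's own statement) =====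
-- stated objective: alternative
-- what changed: B first collects the indices of the nonzero elements (with -1 and len(nums) as sentinels) and then sums a closed-form triangular number for each gap between consecutive nonzero positions, instead of A's single pass that tracks a running zero count and accumulates it per element.
import Mathlib
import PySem

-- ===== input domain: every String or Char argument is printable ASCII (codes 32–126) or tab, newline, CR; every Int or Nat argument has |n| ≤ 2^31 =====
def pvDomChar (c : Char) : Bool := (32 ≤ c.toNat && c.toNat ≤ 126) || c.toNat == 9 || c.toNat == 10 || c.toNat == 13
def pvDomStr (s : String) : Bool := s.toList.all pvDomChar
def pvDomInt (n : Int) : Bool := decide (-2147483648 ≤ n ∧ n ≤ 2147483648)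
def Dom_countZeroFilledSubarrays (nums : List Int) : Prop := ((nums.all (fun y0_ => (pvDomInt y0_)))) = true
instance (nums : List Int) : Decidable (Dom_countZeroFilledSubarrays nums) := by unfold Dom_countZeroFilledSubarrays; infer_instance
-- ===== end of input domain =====

-- B collects the indices of the nonzero elements (with sentinels -1 and len(nums)) and sums
-- a closed-form triangular number for each gap between consecutive nonzero positions,
-- instead of A's running-count accumulation (alternative decomposition, same cost).

-- ===== PORT A =====
-- A's loop: state (count, res); if num == 0 then count += 1; res += count else count = 0
def countZeroFilledSubarrays (nums : List Int) : Int :=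
  (nums.foldl (fun (st : Int × Int) num =>
      if num == 0 then (st.1 + 1, st.2 + (st.1 + 1)) else (0, st.2))
    (0, 0)).2

-- ===== PORT B =====
-- bounds = [-1] + [i for i, x in enumerate(nums) if x != 0] + [len(nums)]
-- return sum((b - a - 1) * (b - a) // 2 for a, b in zip(bounds, bounds[1:]))
def countZeroFilledSubarrays_alt (nums : List Int) : Int :=
  let bounds : List Int :=
    [-1] ++ ((PySem.List.enumerate nums).filter (fun p => !(p.2 == 0))).map (fun p => p.1)
         ++ [(nums.length : Int)]
  ((bounds.zip (PySem.List.slice bounds (some 1) none)).map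
      (fun p => PySem.Int.floordiv ((p.2 - p.1 - 1) * (p.2 - p.1)) 2)).sum

-- ===== PRECONDITION & SPEC =====
def Spec_countZeroFilledSubarrays (nums : List Int) (out : Int) : Prop := out = countZeroFilledSubarrays_alt nums
instance (nums : List Int) (out : Int) : Decidable (Spec_countZeroFilledSubarrays nums out) := by unfold Spec_countZeroFilledSubarrays; infer_instance

-- ===== CLAIM (what is proved, stated in full; the proofs are below) =====
def Claim_equal_countZeroFilledSubarrays : Prop := ∀ (nums : List Int), Dom_countZeroFilledSubarrays nums → Spec_countZeroFilledSubarrays nums (countZeroFilledSubarrays nums)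

-- ===== LEMMAS AND PROOFS =====

-- tri c = c*(c+1) // 2, the term B sums per gap (with c = b - a - 1)
def pvTri (c : Int) : Int := PySem.Int.floordiv (c * (c + 1)) 2

-- sum over consecutive pairs of a bounds list, as B computes it
def pvGapSum (l : List Int) : Int :=
  ((l.zip (PySem.List.slice l (some 1) none)).map
      (fun p => PySem.Int.floordiv ((p.2 - p.1 - 1) * (p.2 - p.1)) 2)).sum

theorem pvGapSum_single (a : Int) : pvGapSum [a] = 0 := by
  simp [pvGapSum, PySem.List.slice_from_one]

theorem pvGapSum_cons (a b : Int) (l : List Int) :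
    pvGapSum (a :: b :: l) = pvTri (b - a - 1) + pvGapSum (b :: l) := by
  simp [pvGapSum, pvTri, PySem.List.slice_from_one]

-- exactness of the triangular closed form
theorem pvTri_mul_two (c : Int) : pvTri c * 2 = c * (c + 1) := by
  have h2 : (0:Int) < 2 := by norm_num
  unfold pvTri
  rw [PySem.Int.floordiv_eq_ediv_of_pos h2]
  have : (2:Int) ∣ c * (c + 1) := (Int.even_mul_succ_self c).two_dvd
  omega

theorem pvTri_succ (c : Int) : pvTri (c + 1) = pvTri c + (c + 1) := by
  have h1 := pvTri_mul_two c
  have h2 := pvTri_mul_two (c + 1)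
  nlinarith [h1, h2]

theorem pvTri_zero : pvTri 0 = 0 := by decide

-- loop invariant relating A's fold from state (c, r) after position i (last nonzero at a)
-- to B's gap sum over [a] ++ nonzero positions from offset i ++ [i + len].
theorem pv_invariant (nums : List Int) :
    ∀ (i : Int) (a c r : Int), c = i - 1 - a →
      (nums.foldl (fun (st : Int × Int) num =>
          if num == 0 then (st.1 + 1, st.2 + (st.1 + 1)) else (0, st.2))
        (c, r)).2
      = r - pvTri c +
        pvGapSum ([a] ++ ((PySem.List.enumerate nums i).filter (fun p => !(p.2 == 0))).map (fun p => p.1)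
                      ++ [i + (nums.length : Int)]) := by
  induction nums with
  | nil =>
      intro i a c r hc
      have h1 : pvGapSum [a, i] = pvTri (i - a - 1) := by
        rw [pvGapSum_cons, pvGapSum_single]; ring
      simp only [List.foldl_nil, PySem.List.enumerate_nil, List.filter_nil, List.map_nil,
        List.length_nil, Nat.cast_zero, add_zero, List.append_nil, List.singleton_append, h1]
      rw [hc]; ring_nf
  | cons x xs ih =>
      intro i a c r hc
      rw [PySem.List.enumerate_cons]
      have hlen : i + (((x :: xs).length : Nat) : Int) = i + 1 + ((xs.length : Nat) : Int) := by
        push_cast [List.length_cons]; ring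
      by_cases hx : x = 0
      · have hb : (x == 0) = true := by simpa using hx
        simp only [List.foldl_cons, if_true, List.filter_cons, hb, Bool.not_true,
          Bool.false_eq_true, if_false]
        rw [ih (i + 1) a (c + 1) (r + (c + 1)) (by omega), hlen, pvTri_succ]
        ring
      · have hb : (x == 0) = false := by simpa using hx
        simp only [List.foldl_cons, Bool.false_eq_true, if_false, List.filter_cons, hb,
          Bool.not_false, if_true, List.map_cons]
        rw [ih (i + 1) i 0 r (by omega), hlen, pvTri_zero]
        have h1 : [a] ++ (i :: ((PySem.List.enumerate xs (i+1)).filter (fun p => !(p.2 == 0))).map (fun p => p.1)) ++ [i + 1 + ((xs.length : Nat) : Int)]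
            = a :: i :: (((PySem.List.enumerate xs (i+1)).filter (fun p => !(p.2 == 0))).map (fun p => p.1) ++ [i + 1 + ((xs.length : Nat) : Int)]) := by
          simp
        have h2 : [i] ++ ((PySem.List.enumerate xs (i+1)).filter (fun p => !(p.2 == 0))).map (fun p => p.1) ++ [i + 1 + ((xs.length : Nat) : Int)]
            = i :: (((PySem.List.enumerate xs (i+1)).filter (fun p => !(p.2 == 0))).map (fun p => p.1) ++ [i + 1 + ((xs.length : Nat) : Int)]) := by
          simp
        rw [h1, h2, pvGapSum_cons]
        have h3 : i - a - 1 = i - 1 - a := by ring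
        rw [h3, hc]
        ring

-- ===== VERDICT (by name: the statement is the Claim_ definition above) =====
theorem countZeroFilledSubarrays_spec : Claim_equal_countZeroFilledSubarrays := by
  intro nums _
  unfold Spec_countZeroFilledSubarrays countZeroFilledSubarrays countZeroFilledSubarrays_alt
  have := pv_invariant nums 0 (-1) 0 0 (by omega)
  rw [this, pvTri_zero]
  simp [pvGapSum]
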